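-- pv_equiv track=rewrite | github.com/ermanatik/YazilimLab2_Proje2 | test2.py | brute_force_min_differences
-- ===== SOURCE A (Python) =====
-- def brute_force_min_differences(dizi):
--     n = len(dizi)
--     min_farklar = []
--
--     for i in range(n-1):
--         for j in range(i+1, n):
--             fark = abs(dizi[i] - dizi[j])
--             min_farklar.append(fark)
--
--     min_farklar.sort()
--     return min_farklar[:n//2]
-- ===== SOURCE B (Python) =====
-- def brute_force_min_differences(dizi):
--     # Sort once: taking x in ascending order, every remaining element y gives
--     # the pair difference y - x directly, so abs() disappears.
--     rest = sorted(dizi)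
--     diffs = []
--     while rest:
--         x = rest[0]
--         rest = rest[1:]
--         diffs.extend(y - x for y in rest)
--     diffs.sort()
--     return diffs[:len(dizi) // 2]
-- ===== Notes on version B (the rewrite author's own statement) =====
-- stated objective: alternative
-- what changed: B sorts the input first and collects differences by a suffix-consuming loop (y - x for each later y), eliminating abs() and the per-pair nested index loops; the final sort and [:n//2] slice are as in A.
import Mathlib
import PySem

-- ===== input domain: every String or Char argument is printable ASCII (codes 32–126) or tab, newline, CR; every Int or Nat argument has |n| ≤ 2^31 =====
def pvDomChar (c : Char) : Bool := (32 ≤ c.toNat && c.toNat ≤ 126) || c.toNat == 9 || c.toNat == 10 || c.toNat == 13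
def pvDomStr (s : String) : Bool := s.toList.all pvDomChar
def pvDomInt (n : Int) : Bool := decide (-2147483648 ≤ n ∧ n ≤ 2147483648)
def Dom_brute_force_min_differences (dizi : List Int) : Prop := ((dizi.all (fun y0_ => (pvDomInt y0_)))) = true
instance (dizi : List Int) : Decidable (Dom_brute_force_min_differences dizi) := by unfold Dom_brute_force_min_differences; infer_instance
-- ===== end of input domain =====

-- B sorts the input once so every pairwise difference is taken in ascending order (no abs),
-- collected by a suffix-consuming loop instead of A's nested index loops; objective: alternative.


-- ===== PORT A =====
-- n = len(dizi); nested loops append abs(dizi[i]-dizi[j]); sort; return min_farklar[:n//2]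
def brute_force_min_differences (dizi : List Int) : List Int :=
  PySem.List.slice
    (PySem.List.sorted
      ((PySem.List.pyRange 0 ((dizi.length : Int) - 1)).foldl (fun acc i =>
        (PySem.List.pyRange (i + 1) (dizi.length : Int)).foldl (fun acc2 j =>
          acc2 ++ [|PySem.List.pyGetD dizi i 0 - PySem.List.pyGetD dizi j 0|]) acc) [])
      (fun x => x))
    none (some (PySem.Int.floordiv (dizi.length : Int) 2))

-- ===== PORT B =====
-- Source B's 'while rest: x = rest[0]; rest = rest[1:]; diffs.extend(y - x for y in rest)'
def pvSuffixDiffs : List Int → List Int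
  | [] => []
  | x :: rest => rest.map (fun y => y - x) ++ pvSuffixDiffs rest

-- s = sorted(dizi); diffs = suffix differences of s; diffs.sort(); return diffs[:len(dizi)//2]
def brute_force_min_differences_alt (dizi : List Int) : List Int :=
  PySem.List.slice
    (PySem.List.sorted (pvSuffixDiffs (PySem.List.sorted dizi (fun x => x))) (fun x => x))
    none (some (PySem.Int.floordiv (dizi.length : Int) 2))

-- ===== PRECONDITION & SPEC =====
def Spec_brute_force_min_differences (dizi : List Int) (out : List Int) : Prop := out = brute_force_min_differences_alt dizi
instance (dizi : List Int) (out : List Int) : Decidable (Spec_brute_force_min_differences dizi out) := by unfold Spec_brute_force_min_differences; infer_instance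

-- ===== CLAIM (what is proved, stated in full; the proofs are below) =====
def Claim_equal_brute_force_min_differences : Prop := ∀ (dizi : List Int), Dom_brute_force_min_differences dizi → Spec_brute_force_min_differences dizi (brute_force_min_differences dizi)

-- ===== LEMMAS AND PROOFS =====

-- A's nested loops, with abs, as structural recursion over suffixes
def pvAbsDiffs : List Int → List Int
  | [] => []
  | x :: rest => rest.map (fun y => |x - y|) ++ pvAbsDiffs rest

-- flatMap of singletons is map
lemma pvFlatMap_singleton (g : Int → Int) (r : List Int) :
    List.flatMap (fun j => [g j]) r = r.map g := by
  induction r with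
  | nil => rfl
  | cons a t ih => simp_all [List.flatMap_cons]

-- A's Nat-indexed pair generation equals the structural form
lemma pvA_indexed (l : List Int) :
    (List.range (l.length - 1)).flatMap
      (fun k => (l.drop (k + 1)).map (fun y => |l.getD k 0 - y|)) = pvAbsDiffs l := by
  induction l with
  | nil => simp [pvAbsDiffs]
  | cons x xs ih =>
    cases xs with
    | nil => simp [pvAbsDiffs]
    | cons z zs =>
      rw [show (x :: z :: zs).length - 1 = (z :: zs).length - 1 + 1 from by simp,
          List.range_succ_eq_map]
      rw [List.flatMap_cons, List.flatMap_map]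
      rw [pvAbsDiffs]
      congr 1

-- the multiset of pairwise absolute differences depends only on the multiset of elements
lemma pvAbsDiffs_perm {l l' : List Int} (h : l.Perm l') : (pvAbsDiffs l).Perm (pvAbsDiffs l') := by
  induction h with
  | nil => exact List.Perm.refl _
  | cons x h ih => exact List.Perm.append (h.map _) ih
  | swap x y l =>
    simp only [pvAbsDiffs, List.map_cons, List.cons_append]
    rw [abs_sub_comm y x]
    refine List.Perm.cons _ ?_
    calc (l.map (fun z => |y - z|) ++ (l.map (fun z => |x - z|) ++ pvAbsDiffs l)).Perm
          ((l.map (fun z => |x - z|) ++ l.map (fun z => |y - z|)) ++ pvAbsDiffs l) := by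
            rw [← List.append_assoc]
            exact List.Perm.append_right _ List.perm_append_comm
      _ = _ := by rw [List.append_assoc]
  | trans _ _ ih1 ih2 => exact ih1.trans ih2

-- on an ascending list the abs is redundant
lemma pvAbsDiffs_of_sorted {s : List Int} (h : s.Pairwise (· ≤ ·)) :
    pvAbsDiffs s = pvSuffixDiffs s := by
  induction s with
  | nil => rfl
  | cons x rest ih =>
    rcases List.pairwise_cons.1 h with ⟨hx, hrest⟩
    simp only [pvAbsDiffs, pvSuffixDiffs, ih hrest]
    congr 1
    exact List.map_congr_left (fun y hy => by
      rw [abs_sub_comm, abs_of_nonneg (by linarith [hx y hy])])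

-- A's raw difference list equals pvAbsDiffs
lemma pvA_loop (dizi : List Int) :
    (PySem.List.pyRange 0 ((dizi.length : Int) - 1)).foldl (fun acc i =>
      (PySem.List.pyRange (i + 1) (dizi.length : Int)).foldl (fun acc2 j =>
        acc2 ++ [|PySem.List.pyGetD dizi i 0 - PySem.List.pyGetD dizi j 0|]) acc) []
    = pvAbsDiffs dizi := by
  have hinner : ∀ (acc : List Int) (i : Int), 0 ≤ i →
      (PySem.List.pyRange (i + 1) (dizi.length : Int)).foldl (fun acc2 j =>
        acc2 ++ [|PySem.List.pyGetD dizi i 0 - PySem.List.pyGetD dizi j 0|]) acc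
      = acc ++ (dizi.drop (i + 1).toNat).map (fun y => |PySem.List.pyGetD dizi i 0 - y|) := by
    intro acc i hi
    rw [PySem.List.foldl_append_eq_flatMap
      (fun j => [|PySem.List.pyGetD dizi i 0 - PySem.List.pyGetD dizi j 0|])]
    congr 1
    rw [pvFlatMap_singleton]
    have hd := PySem.List.map_pyGetD_pyRange (xs := dizi) (d := 0) (a := i + 1) (by omega)
    rw [PySem.List.len_eq] at hd
    calc (PySem.List.pyRange (i + 1) (dizi.length : Int)).map
            (fun j => |PySem.List.pyGetD dizi i 0 - PySem.List.pyGetD dizi j 0|)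
        = ((PySem.List.pyRange (i + 1) (dizi.length : Int)).map
            (fun j => PySem.List.pyGetD dizi j 0)).map
            (fun y => |PySem.List.pyGetD dizi i 0 - y|) := by rw [List.map_map]; rfl
      _ = (dizi.drop (i + 1).toNat).map (fun y => |PySem.List.pyGetD dizi i 0 - y|) := by
            rw [hd]
  rw [PySem.List.foldl_congr_mem _ _
    (fun acc i => acc ++ (dizi.drop (i + 1).toNat).map (fun y => |PySem.List.pyGetD dizi i 0 - y|)) _
    (fun acc i hi => hinner acc i (PySem.List.mem_pyRange_one.1 hi).1)]
  rw [PySem.List.foldl_append_eq_flatMap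
    (fun i => (dizi.drop (i + 1).toNat).map (fun y => |PySem.List.pyGetD dizi i 0 - y|))]
  rw [List.nil_append, PySem.List.pyRange_one, List.flatMap_map]
  have hlen : ((dizi.length : Int) - 1 - 0).toNat = dizi.length - 1 := by omega
  rw [hlen, ← pvA_indexed dizi]
  apply List.flatMap_congr
  intro k hk
  rw [zero_add, PySem.List.pyGetD_natCast, show ((k : Int) + 1).toNat = k + 1 from by omega]

-- combined: the sorted difference lists agree
lemma pvSorted_eq (dizi : List Int) :
    PySem.List.sorted
      ((PySem.List.pyRange 0 ((dizi.length : Int) - 1)).foldl (fun acc i =>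
        (PySem.List.pyRange (i + 1) (dizi.length : Int)).foldl (fun acc2 j =>
          acc2 ++ [|PySem.List.pyGetD dizi i 0 - PySem.List.pyGetD dizi j 0|]) acc) [])
      (fun x => x)
      = PySem.List.sorted (pvSuffixDiffs (PySem.List.sorted dizi (fun x => x))) (fun x => x) := by
  rw [pvA_loop, ← pvAbsDiffs_of_sorted (PySem.List.sorted_pairwise dizi (fun x => x))]
  exact PySem.List.sorted_eq_sorted_of_perm _ _ _ (fun a b h => h)
    (pvAbsDiffs_perm (PySem.List.sorted_perm dizi (fun x => x) false)).symm

-- ===== VERDICT (by name: the statement is the Claim_ definition above) =====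
theorem brute_force_min_differences_spec : Claim_equal_brute_force_min_differences := by
  intro dizi _
  unfold Spec_brute_force_min_differences brute_force_min_differences brute_force_min_differences_alt
  rw [pvSorted_eq]
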